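-- pv_equiv track=rewrite | github.com/briancheon/Algorithm | baekjoon/python/31335 (What the Flex?).py | next_version
-- ===== SOURCE A (Python) =====
-- def next_version(powers, primes, N):
--     for i in range(len(powers) - 1, -1, -1):
--         check = powers[:]
--         check[i] += 1
--         for j in range(i + 1, len(powers)):
--             check[j] = 1
--
--         product = 1
--         for p, exp in zip(primes, check):
--             product *= p ** exp
--
--             if product > N:
--                 break
--
--         if product <= N:
--             return product
--
--     return None
-- ===== SOURCE B (Python) =====
-- def next_version(powers, primes, N):
--     n = len(powers)
--     # one factor per exponent slot; a slot without a prime gets the neutral factor 1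
--     fact = primes[:n] + [1] * (n - len(primes))
--     # pref[k] = product of fact[t] ** powers[t] for t < k; ok[k] = all prefixes so far <= N
--     pref = [1]
--     for p, e in zip(fact, powers):
--         pref.append(pref[-1] * p ** e)
--     ok = [True]
--     for q in pref[1:]:
--         ok.append(ok[-1] and q <= N)
--     for i in range(n - 1, -1, -1):
--         if not ok[i]:
--             continue
--         r = pref[i] * fact[i] ** (powers[i] + 1)
--         good = r <= N
--         for p in fact[i + 1:]:
--             if not good:
--                 break
--             r *= p
--             good = r <= N
--         if good:
--             return r
--     return None
-- ===== Notes on version B (the rewrite author's own statement) =====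
-- stated objective: alternative
-- what changed: B aligns one factor per exponent slot (missing primes act as the neutral factor 1), precomputes a prefix-product table pref[k] and a monotone prefix-feasibility table ok[k], then decides each descending candidate i from pref[i], one fresh power fact[i]**(powers[i]+1) and a short tail scan, instead of A's rebuilding the whole exponent list and recomputing every prime power from scratch for every i; Pre_ excludes powers lists with a negative entry, on which Python's ** yields a float (a non-int result) or raises, so neither program computes an integer there.
-- outside the precondition, e.g. on next_version([-1, 1], [2, 3], 100): A returns 4.5, B returns 4.5; on next_version([5, -1], [2, 0], 3): A returns None, B raises ZeroDivisionError
import Mathlib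
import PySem

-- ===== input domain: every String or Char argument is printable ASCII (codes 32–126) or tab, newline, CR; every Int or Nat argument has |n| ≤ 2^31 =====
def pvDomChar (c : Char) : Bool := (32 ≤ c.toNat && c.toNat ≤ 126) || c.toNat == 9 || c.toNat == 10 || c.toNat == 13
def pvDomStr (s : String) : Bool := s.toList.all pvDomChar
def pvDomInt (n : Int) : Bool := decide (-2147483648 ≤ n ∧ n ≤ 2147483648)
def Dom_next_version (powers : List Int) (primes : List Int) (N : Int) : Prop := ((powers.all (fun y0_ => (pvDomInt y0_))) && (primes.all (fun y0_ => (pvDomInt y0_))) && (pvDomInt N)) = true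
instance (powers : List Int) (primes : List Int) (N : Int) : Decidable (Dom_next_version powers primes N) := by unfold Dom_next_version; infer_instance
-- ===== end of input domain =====

-- B aligns one factor per exponent slot (missing primes act as the neutral factor 1) and
-- replaces A's per-candidate rebuild of the exponent list and recomputation of every
-- prime power by a prefix-product table plus one fresh power and a tail scan per candidate
-- (objective: alternative algorithm; equal return values on Pre_ proved below).

-- ===== PORT A =====
-- check = powers[:]; check[i] += 1; for j in range(i+1, len(powers)): check[j] = 1
def aCheck (powers : List Int) (i : Nat) : List Int :=
  let c := powers.set i (powers.getD i 0 + 1)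
  (PySem.List.pyRange ((i : Int) + 1) (powers.length : Int) 1).foldl
    (fun c j => c.set j.toNat 1) c

-- for p, exp in zip(primes, check): product *= p ** exp; if product > N: break
-- (p ** exp ported as p ^ exp.toNat: exact for exp ≥ 0, which Pre_ guarantees)
def aInner (N : Int) : List (Int × Int) → Int → Int
  | [], product => product
  | (p, exp) :: rest, product =>
      let product' := product * p ^ exp.toNat
      if N < product' then product' else aInner N rest product'

-- for i in range(len(powers)-1, -1, -1): …  (fuel i+1 means current index i)
def aLoop (powers primes : List Int) (N : Int) : Nat → Option Int
  | 0 => none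
  | i + 1 =>
      let check := aCheck powers i
      let product := aInner N (primes.zip check) 1
      if product ≤ N then some product else aLoop powers primes N i

def next_version (powers : List Int) (primes : List Int) (N : Int) : Option Int :=
  aLoop powers primes N powers.length

-- ===== PORT B =====
-- for p, e in zip(fact, powers): pref.append(pref[-1] * p ** e)
-- (acc carries pref[-1]; p ** e ported as p ^ e.toNat: exact for e ≥ 0, which Pre_ guarantees)
def bPrefAux (acc : Int) : List (Int × Int) → List Int
  | [] => []
  | (p, e) :: rest => let a := acc * p ^ e.toNat; a :: bPrefAux a rest

-- for q in pref[1:]: ok.append(ok[-1] and q <= N)   (g carries ok[-1])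
def bOkAux (N : Int) (g : Bool) : List Int → List Bool
  | [] => []
  | q :: rest => let g' := g && decide (q ≤ N); g' :: bOkAux N g' rest

-- for p in fact[i+1:]: if not good: break; r *= p; good = r <= N
def bTail (N : Int) : List Int → Int → Bool → Int × Bool
  | [], r, good => (r, good)
  | p :: rest, r, good =>
      if good then bTail N rest (r * p) (decide (r * p ≤ N)) else (r, good)

-- for i in range(n-1, -1, -1): …  (fuel i+1 means current index i; the table and factor
-- lookups use getD, exact since every index visited is in range)
def bLoop (powers fact : List Int) (N : Int) (pref : List Int) (ok : List Bool) :
    Nat → Option Int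
  | 0 => none
  | i + 1 =>
      if ok.getD i true then
        let r := pref.getD i 1 * (fact.getD i 0) ^ ((powers.getD i 0) + 1).toNat
        let rg := bTail N (PySem.List.slice fact (some ((i : Int) + 1)) none) r
            (decide (r ≤ N))
        if rg.2 then some rg.1 else bLoop powers fact N pref ok i
      else bLoop powers fact N pref ok i

-- fact = primes[:n] + [1] * (n - len(primes))
def next_version_alt (powers : List Int) (primes : List Int) (N : Int) : Option Int :=
  let fact := PySem.List.slice primes none (some (powers.length : Int)) ++
    List.replicate ((powers.length : Int) - (primes.length : Int)).toNat 1
  let pref := 1 :: bPrefAux 1 (fact.zip powers)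
  let ok := true :: bOkAux N true (bPrefAux 1 (fact.zip powers))
  bLoop powers fact N pref ok powers.length

-- ===== PRECONDITION & SPEC =====
-- Pre_ excludes powers lists containing a negative entry: Python's ** with a negative int
-- exponent yields a float (a non-int result, e.g. A returns 4.5) or raises
-- ZeroDivisionError, so on such inputs neither program computes an integer reliably.
def Pre_next_version (powers : List Int) (primes : List Int) (N : Int) : Prop :=
  ∀ x ∈ powers, 0 ≤ x
instance (powers : List Int) (primes : List Int) (N : Int) :
    Decidable (Pre_next_version powers primes N) := by unfold Pre_next_version; infer_instance

def pvWitness_next_version : List Int × List Int × Int := ([1, 2], [2, 3], 100)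

def Spec_next_version (powers : List Int) (primes : List Int) (N : Int) (out : Option Int) :
    Prop := out = next_version_alt powers primes N
instance (powers : List Int) (primes : List Int) (N : Int) (out : Option Int) :
    Decidable (Spec_next_version powers primes N out) := by unfold Spec_next_version; infer_instance

-- ===== CLAIM (what is proved, stated in full; the proofs are below) =====
def Claim_equal_next_version : Prop := ∀ (powers : List Int) (primes : List Int) (N : Int), Dom_next_version powers primes N → Pre_next_version powers primes N → Spec_next_version powers primes N (next_version powers primes N)

-- ===== LEMMAS AND PROOFS =====

-- the padded factor list in take/replicate form
def padded (powers primes : List Int) : List Int :=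
  primes.take powers.length ++ List.replicate (powers.length - primes.length) 1

theorem fact_eq_padded (powers primes : List Int) :
    PySem.List.slice primes none (some (powers.length : Int)) ++
      List.replicate ((powers.length : Int) - (primes.length : Int)).toNat 1
    = padded powers primes := by
  rw [PySem.List.slice_to_natCast, padded]
  congr 1
  congr 1
  omega

theorem padded_length (powers primes : List Int) :
    (padded powers primes).length = powers.length := by
  simp [padded]
  omega

-- running product of acc * ∏ p ^ e over a pair list
def prodPE (acc : Int) : List (Int × Int) → Int
  | [] => acc
  | (p, e) :: rest => prodPE (acc * p ^ e.toNat) rest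

-- every running product stays ≤ N
def okAll (N acc : Int) : List (Int × Int) → Bool
  | [] => true
  | (p, e) :: rest => decide (acc * p ^ e.toNat ≤ N) && okAll N (acc * p ^ e.toNat) rest

theorem prodPE_append (acc : Int) (L1 L2 : List (Int × Int)) :
    prodPE acc (L1 ++ L2) = prodPE (prodPE acc L1) L2 := by
  induction L1 generalizing acc with
  | nil => rfl
  | cons h t ih => cases h with | mk p e => simp [prodPE, ih]

theorem okAll_append (N acc : Int) (L1 L2 : List (Int × Int)) :
    okAll N acc (L1 ++ L2) = (okAll N acc L1 && okAll N (prodPE acc L1) L2) := by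
  induction L1 generalizing acc with
  | nil => simp [okAll, prodPE]
  | cons h t ih => cases h with | mk p e => simp [okAll, prodPE, ih, Bool.and_assoc]

theorem prodPE_ones (acc : Int) (xs : List Int) :
    prodPE acc (xs.map (fun e => ((1 : Int), e))) = acc := by
  induction xs generalizing acc with
  | nil => rfl
  | cons e t ih => simpa [prodPE] using ih acc

theorem okAll_ones (N acc : Int) (xs : List Int) :
    okAll N acc (xs.map (fun e => ((1 : Int), e))) = (xs.isEmpty || decide (acc ≤ N)) := by
  induction xs generalizing acc with
  | nil => simp [okAll]
  | cons e t ih =>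
    simp only [List.map_cons, okAll, one_pow, mul_one, ih, List.isEmpty_cons]
    cases h : decide (acc ≤ N) <;> simp

theorem prodPE_rep (acc : Int) (k : Nat) :
    prodPE acc (List.replicate k ((1 : Int), (1 : Int))) = acc := by
  induction k generalizing acc with
  | zero => rfl
  | succ k ih => simpa [List.replicate_succ, prodPE] using ih acc

theorem okAll_rep (N acc : Int) (k : Nat) :
    okAll N acc (List.replicate k ((1 : Int), (1 : Int))) = (decide (k = 0) || decide (acc ≤ N)) := by
  induction k generalizing acc with
  | zero => simp [okAll]
  | succ k ih =>
    simp only [List.replicate_succ, okAll, one_pow, mul_one, ih]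
    cases h : decide (acc ≤ N) <;> simp

theorem aInner_le_iff (N : Int) (L : List (Int × Int)) (acc : Int) :
    decide (aInner N L acc ≤ N) = (okAll N acc L && decide (prodPE acc L ≤ N)) := by
  induction L generalizing acc with
  | nil => simp [aInner, okAll, prodPE]
  | cons h t ih =>
    cases h with | mk p e =>
    simp only [aInner, okAll, prodPE]
    by_cases hle : acc * p ^ e.toNat ≤ N
    · have : ¬ N < acc * p ^ e.toNat := not_lt.mpr hle
      simp only [this, if_false, hle, decide_true, Bool.true_and, ih]
      rfl
    · have : N < acc * p ^ e.toNat := lt_of_not_ge hle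
      simp [this, hle]

theorem aInner_eq_prodPE (N : Int) (L : List (Int × Int)) (acc : Int)
    (h : okAll N acc L = true) : aInner N L acc = prodPE acc L := by
  induction L generalizing acc with
  | nil => rfl
  | cons hd t ih =>
    cases hd with | mk p e =>
    simp only [okAll, Bool.and_eq_true, decide_eq_true_eq] at h
    simp only [aInner, prodPE]
    have : ¬ N < acc * p ^ e.toNat := not_lt.mpr h.1
    simp [this, ih _ h.2]

theorem okAll_last (N : Int) (L : List (Int × Int)) (acc : Int)
    (h : okAll N acc L = true) (ha : acc ≤ N) : prodPE acc L ≤ N := by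
  induction L generalizing acc with
  | nil => exact ha
  | cons hd t ih =>
    cases hd with | mk p e =>
    simp only [okAll, Bool.and_eq_true, decide_eq_true_eq] at h
    exact ih _ h.2 h.1

theorem pref_getD (pairs : List (Int × Int)) (acc : Int) (k : Nat) (hk : k ≤ pairs.length) :
    (acc :: bPrefAux acc pairs).getD k 1 = prodPE acc (pairs.take k) := by
  induction pairs generalizing acc k with
  | nil =>
    have hk0 : k = 0 := Nat.le_zero.mp (by simpa using hk)
    subst hk0; rfl
  | cons hd t ih =>
    cases hd with | mk p e =>
    cases k with
    | zero => rfl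
    | succ k =>
      simp only [List.length_cons] at hk
      simpa [bPrefAux, prodPE] using ih (acc * p ^ e.toNat) k (by omega)

theorem ok_getD (N : Int) (pairs : List (Int × Int)) (acc : Int) (g : Bool) (k : Nat)
    (hk : k ≤ pairs.length) :
    (g :: bOkAux N g (bPrefAux acc pairs)).getD k true = (g && okAll N acc (pairs.take k)) := by
  induction pairs generalizing acc g k with
  | nil =>
    have hk0 : k = 0 := Nat.le_zero.mp (by simpa using hk)
    subst hk0; simp [okAll]
  | cons hd t ih =>
    cases hd with | mk p e =>
    cases k with
    | zero => simp [okAll]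
    | succ k =>
      simp only [List.length_cons] at hk
      have := ih (acc * p ^ e.toNat) (g && decide (acc * p ^ e.toNat ≤ N)) k (by omega)
      simpa [bPrefAux, bOkAux, okAll, Bool.and_assoc] using this

theorem bTail_false (N : Int) (ps : List Int) (r : Int) : bTail N ps r false = (r, false) := by
  cases ps <;> simp [bTail]

theorem bTail_snd (N : Int) (ps : List Int) (r : Int) :
    (bTail N ps r true).2 = okAll N r (ps.map (fun p => (p, 1))) := by
  induction ps generalizing r with
  | nil => simp [bTail, okAll]
  | cons p t ih =>
    simp only [bTail, if_pos]
    by_cases hle : r * p ≤ N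
    · simpa [okAll, hle] using ih (r * p)
    · simp [okAll, hle, bTail_false]

theorem bTail_fst (N : Int) (ps : List Int) (r : Int)
    (h : okAll N r (ps.map (fun p => (p, 1))) = true) :
    (bTail N ps r true).1 = prodPE r (ps.map (fun p => (p, 1))) := by
  induction ps generalizing r with
  | nil => rfl
  | cons p t ih =>
    simp only [List.map_cons, okAll, Bool.and_eq_true, decide_eq_true_eq] at h
    have h1 : r * p ^ (1 : Int).toNat = r * p := by norm_num
    rw [h1] at h
    simp only [bTail, if_pos]
    have : decide (r * p ≤ N) = true := decide_eq_true h.1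
    rw [this]
    simpa [prodPE, h1] using ih (r * p) h.2

theorem setTail_fold (c : List Int) (a : Nat) (ha : a ≤ c.length) :
    (PySem.List.pyRange ((a : Int)) (c.length : Int) 1).foldl (fun c j => c.set j.toNat 1) c
      = c.take a ++ List.replicate (c.length - a) 1 := by
  induction h : c.length - a generalizing c a with
  | zero =>
    have hae : a = c.length := by omega
    subst hae
    rw [PySem.List.pyRange_one_eq_nil le_rfl]
    simp
  | succ k ih =>
    have halt : a < c.length := by omega
    rw [PySem.List.pyRange_one_cons (by exact_mod_cast halt)]
    simp only [List.foldl_cons, Int.toNat_natCast]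
    have hlen : (c.set a 1).length = c.length := by simp
    have ihr := ih (c.set a 1) (a + 1) (by omega) (by omega)
    rw [hlen] at ihr
    push_cast at ihr
    rw [ihr]
    have hset : c.set a 1 = c.take a ++ 1 :: c.drop (a + 1) := by
      rw [List.set_eq_take_append_cons_drop, if_pos halt]
    rw [hset, List.take_append, List.length_take,
      List.take_take]
    have h1 : min (a + 1) a = a := by omega
    have h2 : a + 1 - min a c.length = 1 := by omega
    rw [h1, h2]
    simp [List.replicate_succ]

theorem aCheck_eq (powers : List Int) (i : Nat) (hi : i < powers.length) :
    aCheck powers i =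
      powers.take i ++ (powers.getD i 0 + 1) :: List.replicate (powers.length - 1 - i) 1 := by
  unfold aCheck
  have hlen : (powers.set i (powers.getD i 0 + 1)).length = powers.length := by simp
  have hcast : ((i : Int) + 1) = (((i + 1 : Nat)) : Int) := by push_cast; ring
  rw [← hlen, hcast]
  rw [setTail_fold _ (i + 1) (by omega)]
  have hset : powers.set i (powers.getD i 0 + 1)
      = powers.take i ++ (powers.getD i 0 + 1) :: powers.drop (i + 1) := by
    rw [List.set_eq_take_append_cons_drop, if_pos hi]
  rw [hlen, hset, List.take_append, List.length_take, List.take_take]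
  have h1 : min (i + 1) i = i := by omega
  have h2 : i + 1 - min i powers.length = 1 := by omega
  rw [h1, h2]
  simp
  omega

theorem zip_take (xs ys : List Int) (n : Nat) :
    (xs.take n).zip (ys.take n) = (xs.zip ys).take n := by
  induction xs generalizing ys n with
  | nil => simp
  | cons x xs ih =>
    cases ys with
    | nil => simp
    | cons y ys => cases n with
      | zero => simp
      | succ n => simp [ih]

theorem zip_take_self {α β : Type} (xs : List α) (ys : List β) :
    xs.zip (ys.take xs.length) = xs.zip ys := by
  induction xs generalizing ys with
  | nil => simp
  | cons x xs ih =>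
    cases ys with
    | nil => simp
    | cons y ys => simp [ih]

theorem zip_replicate_one (xs : List Int) (k : Nat) :
    xs.zip (List.replicate k (1 : Int)) = (xs.take k).map (fun p => (p, (1 : Int))) := by
  induction xs generalizing k with
  | nil => simp
  | cons x xs ih =>
    cases k with
    | zero => simp
    | succ k =>
      simp only [List.replicate_succ, List.zip_cons_cons, List.take_succ_cons, List.map_cons, ih,
        List.map_take]

theorem zip_check_lt (powers primes : List Int) (i : Nat)
    (hi : i < min powers.length primes.length) :
    primes.zip (aCheck powers i) =
      (primes.zip powers).take i ++
        (primes.getD i 0, powers.getD i 0 + 1) ::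
          ((primes.drop (i + 1)).take (powers.length - 1 - i)).map (fun p => (p, (1 : Int))) := by
  have hip : i < powers.length := lt_of_lt_of_le hi (Nat.min_le_left _ _)
  have hiq : i < primes.length := lt_of_lt_of_le hi (Nat.min_le_right _ _)
  rw [aCheck_eq powers i hip]
  have hsplit : primes = primes.take i ++ primes.drop i := (List.take_append_drop i primes).symm
  conv_lhs => rw [hsplit]
  rw [List.zip_append (by simp [List.length_take]; omega)]
  rw [zip_take, List.drop_eq_getElem_cons hiq]
  simp only [List.zip_cons_cons]
  rw [zip_replicate_one]
  congr 2
  rw [List.getD_eq_getElem _ _ hiq]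

theorem zip_check_ge (powers primes : List Int) (i : Nat)
    (hm : min powers.length primes.length ≤ i) (hi : i < powers.length) :
    primes.zip (aCheck powers i) = primes.zip powers := by
  have hpl : primes.length ≤ i := by
    rw [Nat.min_def] at hm
    split at hm <;> omega
  have h1 : primes.zip (aCheck powers i) = primes.zip ((aCheck powers i).take primes.length) :=
    (zip_take_self _ _).symm
  have h2 : primes.zip powers = primes.zip (powers.take primes.length) :=
    (zip_take_self _ _).symm
  rw [h1, h2, aCheck_eq powers i hi]
  rw [List.take_append_of_le_length (by simp [List.length_take]; omega), List.take_take]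
  congr 2
  omega

-- the padded pair list is the zipped pairs followed by neutral (1, e) slots
theorem padZip (powers primes : List Int) :
    (padded powers primes).zip powers =
      primes.zip powers ++
        (powers.drop (min primes.length powers.length)).map (fun e => ((1 : Int), e)) := by
  induction powers generalizing primes with
  | nil => simp [padded]
  | cons e t ih =>
    cases primes with
    | nil =>
      have ht := ih ([] : List Int)
      simp only [padded, List.take_nil, List.nil_append, List.length_nil, Nat.sub_zero,
        List.zip_nil_left, Nat.zero_min, List.drop_zero] at ht
      simp only [padded, List.take_nil, List.nil_append, List.length_nil, Nat.sub_zero,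
        List.length_cons, List.replicate_succ, List.zip_cons_cons, List.zip_nil_left,
        Nat.zero_min, List.drop_zero, List.map_cons]
      rw [ht]
    | cons p ps =>
      simp only [padded] at ih ⊢
      simp only [List.length_cons, List.take_succ_cons, Nat.succ_sub_succ, List.cons_append,
        List.zip_cons_cons, Nat.succ_min_succ, List.drop_succ_cons]
      rw [ih ps]

-- ===== VERDICT helper: the two loops agree step for step =====
theorem loop_eq (powers primes : List Int) (N : Int) (i : Nat) :
    i ≤ powers.length →
    aLoop powers primes N i =
      bLoop powers (padded powers primes) N
        (1 :: bPrefAux 1 ((padded powers primes).zip powers))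
        (true :: bOkAux N true (bPrefAux 1 ((padded powers primes).zip powers))) i := by
  induction i with
  | zero => intro _; rfl
  | succ i ih =>
    intro hi
    have hin : i < powers.length := by omega
    have hm : (primes.zip powers).length = min primes.length powers.length := by
      simp [List.length_zip]
    have hPZ : (padded powers primes).zip powers =
        primes.zip powers ++
          (powers.drop (primes.zip powers).length).map (fun e => ((1 : Int), e)) := by
      rw [padZip, hm]
    have hplen : ((padded powers primes).zip powers).length = powers.length := by
      rw [hPZ]; simp [List.length_zip, List.length_drop]
    have hile : i ≤ ((padded powers primes).zip powers).length := by omega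
    have hok0 := ok_getD N ((padded powers primes).zip powers) 1 true i hile
    have hpref0 := pref_getD ((padded powers primes).zip powers) 1 i hile
    have hslice : PySem.List.slice (padded powers primes) (some ((i : Int) + 1)) none
        = (padded powers primes).drop (i + 1) := by
      have hcast : ((i : Int) + 1) = (((i + 1 : Nat)) : Int) := by push_cast; ring
      rw [hcast, PySem.List.slice_from_natCast]
    simp only [aLoop, bLoop]
    rw [hok0, hpref0, hslice]
    simp only [Bool.true_and]
    rcases Nat.lt_or_ge i (primes.zip powers).length with hilt | hige
    · -- index i lies among the genuinely paired slots
      have him : i < min powers.length primes.length := by omega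
      have hiq : i < primes.length := by omega
      rw [zip_check_lt powers primes i him]
      have htake : ((padded powers primes).zip powers).take i = (primes.zip powers).take i := by
        rw [hPZ, List.take_append_of_le_length (by omega)]
      rw [htake]
      have hPi : (padded powers primes).getD i 0 = primes.getD i 0 := by
        have h1 : i < (primes.take powers.length).length := by
          simp [List.length_take]; omega
        have h2 : i < (padded powers primes).length := by rw [padded_length]; omega
        rw [List.getD_eq_getElem _ _ h2, List.getD_eq_getElem _ _ hiq]
        unfold padded
        rw [List.getElem_append_left h1]
        simp
      have hPdrop : (padded powers primes).drop (i + 1)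
          = (primes.drop (i + 1)).take (powers.length - 1 - i)
            ++ List.replicate (powers.length - primes.length) 1 := by
        unfold padded
        rw [List.drop_append]
        have h3 : i + 1 - (primes.take powers.length).length = 0 := by
          simp [List.length_take]; omega
        rw [h3, List.drop_zero, List.drop_take]
        have h4 : powers.length - (i + 1) = powers.length - 1 - i := by omega
        rw [h4]
      rw [hPi, hPdrop]
      set T1 := (primes.zip powers).take i with hT1
      set q := prodPE 1 T1 with hq
      set r := q * (primes.getD i 0) ^ ((powers.getD i 0) + 1).toNat with hr
      set T := (primes.drop (i + 1)).take (powers.length - 1 - i) with hT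
      set tail1 := T.map (fun p => (p, (1 : Int))) with htail1
      set k := powers.length - primes.length with hk
      have hmapapp : (T ++ List.replicate k 1).map (fun p => (p, (1 : Int)))
          = tail1 ++ List.replicate k ((1 : Int), (1 : Int)) := by
        rw [List.map_append, List.map_replicate]
      have habs : (bTail N (T ++ List.replicate k 1) r (decide (r ≤ N))).2
          = (decide (r ≤ N) && okAll N r tail1) := by
        by_cases hrle : r ≤ N
        · rw [decide_eq_true hrle, bTail_snd, hmapapp, okAll_append]
          by_cases hta : okAll N r tail1 = true
          · have hle2 : prodPE r tail1 ≤ N := okAll_last N tail1 r hta hrle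
            rw [hta, okAll_rep]
            simp [hle2, hrle]
          · have hfa : okAll N r tail1 = false := by
              cases hx : okAll N r tail1 <;> simp_all
            simp [hfa]
        · rw [decide_eq_false hrle, bTail_false]; simp
      have hfst : okAll N r tail1 = true → r ≤ N →
          (bTail N (T ++ List.replicate k 1) r (decide (r ≤ N))).1 = prodPE r tail1 := by
        intro hta hrle
        have hle2 : prodPE r tail1 ≤ N := okAll_last N tail1 r hta hrle
        rw [decide_eq_true hrle,
          bTail_fst N _ r (by rw [hmapapp, okAll_append, hta, okAll_rep]; simp [hle2]),
          hmapapp, prodPE_append, prodPE_rep]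
      have hcond := aInner_le_iff N (T1 ++ (primes.getD i 0, powers.getD i 0 + 1) :: tail1) 1
      have hfullOk : okAll N 1 (T1 ++ (primes.getD i 0, powers.getD i 0 + 1) :: tail1)
          = (okAll N 1 T1 && (decide (r ≤ N) && okAll N r tail1)) := by
        rw [okAll_append]
        simp only [okAll, ← hq, ← hr]
      have hfullProd : prodPE 1 (T1 ++ (primes.getD i 0, powers.getD i 0 + 1) :: tail1)
          = prodPE r tail1 := by
        rw [prodPE_append]
        simp only [prodPE, ← hq, ← hr]
      rw [hfullOk, hfullProd] at hcond
      by_cases hTpre : okAll N 1 T1 = true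
      · rw [hTpre]
        by_cases hg : (decide (r ≤ N) && okAll N r tail1) = true
        · obtain ⟨hrd, htl⟩ := Bool.and_eq_true_iff.mp hg
          have hrle : r ≤ N := by simpa using hrd
          have hPle : prodPE r tail1 ≤ N := okAll_last N tail1 r htl hrle
          have hAle : aInner N (T1 ++ (primes.getD i 0, powers.getD i 0 + 1) :: tail1) 1 ≤ N := by
            have hdec : decide
                (aInner N (T1 ++ (primes.getD i 0, powers.getD i 0 + 1) :: tail1) 1 ≤ N)
                = true := by rw [hcond, hTpre, hg, decide_eq_true hPle]; simp
            simpa using hdec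
          rw [if_pos hAle]
          simp only [habs, hg, if_pos]
          rw [hfst htl hrle,
            aInner_eq_prodPE N _ 1 (by rw [hfullOk, hTpre, hg]; simp), hfullProd]
        · have hAnle : ¬ aInner N (T1 ++ (primes.getD i 0, powers.getD i 0 + 1) :: tail1) 1 ≤ N := by
            intro hle
            rw [decide_eq_true hle, hTpre] at hcond
            simp only [Bool.true_and] at hcond
            have hgt : (decide (r ≤ N) && okAll N r tail1) = true := by
              cases hx : (decide (r ≤ N) && okAll N r tail1) <;> simp [hx] at hcond ⊢
            exact hg hgt
          rw [if_neg hAnle]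
          simp only [habs, hg, if_neg Bool.false_ne_true]
          exact ih (by omega)
      · have hTf : okAll N 1 T1 = false := by cases hx : okAll N 1 T1 <;> simp_all
        rw [hTf]
        have hAnle : ¬ aInner N (T1 ++ (primes.getD i 0, powers.getD i 0 + 1) :: tail1) 1 ≤ N := by
          intro hle
          rw [decide_eq_true hle, hTf] at hcond
          simp at hcond
        rw [if_neg hAnle]
        simp only [Bool.false_eq_true]
        exact ih (by omega)
    · -- index i lies beyond the paired slots: the bump is invisible to the product
      have hmin2 : min powers.length primes.length ≤ i := by omega
      rw [zip_check_ge powers primes i hmin2 hin]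
      set base := prodPE 1 (primes.zip powers) with hbase
      have htake2 : ((padded powers primes).zip powers).take i
          = (primes.zip powers) ++
            ((powers.drop (primes.zip powers).length).take
                (i - (primes.zip powers).length)).map (fun e => ((1 : Int), e)) := by
        rw [hPZ, List.take_append, List.take_of_length_le (by omega),
          List.map_take]
      have hok2 : okAll N 1 (((padded powers primes).zip powers).take i)
          = (okAll N 1 (primes.zip powers)
             && (((powers.drop (primes.zip powers).length).take
                    (i - (primes.zip powers).length)).isEmpty || decide (base ≤ N))) := by
        rw [htake2, okAll_append, okAll_ones, hbase]
      have hpref2 : prodPE 1 (((padded powers primes).zip powers).take i) = base := by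
        rw [htake2, prodPE_append, prodPE_ones, hbase]
      have hPi1 : (padded powers primes).getD i 0 = 1 := by
        have h2 : i < (padded powers primes).length := by rw [padded_length]; omega
        rw [List.getD_eq_getElem _ _ h2]
        unfold padded
        rw [List.getElem_append_right (by simp [List.length_take]; omega)]
        simp
      obtain ⟨k2, hk2⟩ : ∃ k2, (padded powers primes).drop (i + 1) = List.replicate k2 1 := by
        refine ⟨powers.length - primes.length - (i + 1 - (primes.take powers.length).length), ?_⟩
        unfold padded
        rw [List.drop_append,
          List.drop_eq_nil_of_le (by simp [List.length_take]; omega), List.nil_append,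
          List.drop_replicate]
      rw [hok2, hpref2, hPi1, hk2]
      simp only [one_pow, mul_one]
      have hsnd2 : (bTail N (List.replicate k2 1) base (decide (base ≤ N))).2
          = decide (base ≤ N) := by
        by_cases hb : base ≤ N
        · rw [decide_eq_true hb, bTail_snd, List.map_replicate, okAll_rep]
          simp [hb]
        · rw [decide_eq_false hb, bTail_false]
      have hfst2 : base ≤ N →
          (bTail N (List.replicate k2 1) base (decide (base ≤ N))).1 = base := by
        intro hb
        rw [decide_eq_true hb,
          bTail_fst N _ base (by rw [List.map_replicate, okAll_rep]; simp [hb]),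
          List.map_replicate, prodPE_rep]
      have hcondA := aInner_le_iff N (primes.zip powers) 1
      by_cases hOK : okAll N 1 (primes.zip powers) = true
      · by_cases hb : base ≤ N
        · have hAle : aInner N (primes.zip powers) 1 ≤ N := by
            have hdec : decide (aInner N (primes.zip powers) 1 ≤ N) = true := by
              rw [hcondA, hOK, ← hbase, decide_eq_true hb]; simp
            simpa using hdec
          have hs : (bTail N (List.replicate k2 1) base true).2 = true := by
            rw [bTail_snd, List.map_replicate, okAll_rep]; simp [hb]
          have hf : (bTail N (List.replicate k2 1) base true).1 = base := by
            rw [bTail_fst N _ base (by rw [List.map_replicate, okAll_rep]; simp [hb]),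
              List.map_replicate, prodPE_rep]
          rw [if_pos hAle, hOK, decide_eq_true hb,
            aInner_eq_prodPE N _ 1 hOK, ← hbase]
          simp [hs, hf]
        · have hAnle : ¬ aInner N (primes.zip powers) 1 ≤ N := by
            intro hle
            rw [decide_eq_true hle, hOK, ← hbase, decide_eq_false hb] at hcondA
            simp at hcondA
          rw [if_neg hAnle, hOK, decide_eq_false hb]
          cases hE : ((powers.drop (primes.zip powers).length).take
              (i - (primes.zip powers).length)).isEmpty <;>
            · simp [hE, bTail_false]
              exact ih (by omega)
      · have hOKf : okAll N 1 (primes.zip powers) = false := by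
          cases hx : okAll N 1 (primes.zip powers) <;> simp_all
        have hAnle : ¬ aInner N (primes.zip powers) 1 ≤ N := by
          intro hle
          rw [decide_eq_true hle, hOKf] at hcondA
          simp at hcondA
        rw [if_neg hAnle, hOKf]
        simp only [Bool.false_and, Bool.false_eq_true, if_neg]
        exact ih (by omega)

-- ===== VERDICT (by name: the statement is the Claim_ definition above) =====
theorem next_version_spec : Claim_equal_next_version := by
  intro powers primes N _hD _hP
  unfold Spec_next_version next_version next_version_alt
  rw [fact_eq_padded]
  exact loop_eq powers primes N powers.length le_rfl
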